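-- pv_equiv track=rewrite | github.com/Felix-hans/GenerativeBenchmarking | data/EXP01/python_3/2556/2556.output_1.py | isPossibleToCutPath
-- ===== SOURCE A (Python) =====
-- def isPossibleToCutPath(grid):
--     m, n = len(grid), len(grid[0])
--
--     def bfs():
--         queue = [(0, 0)]
--         visited = set()
--
--         while queue:
--             row, col = queue.pop(0)
--
--             if row == m-1 and col == n-1:
--                 return True
--
--             visited.add((row, col))
--
--             for dx, dy in [(1, 0), (0, 1)]:
--                 new_row, new_col = row + dx, col + dy
--
--                 if 0 <= new_row < m and 0 <= new_col < n and grid[new_row][new_col] == 1 and (new_row, new_col) not in visited: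
--                     queue.append((new_row, new_col))
--
--         return False
--
--     if bfs():
--         return True
--
--     for row in range(m):
--         for col in range(n):
--             if grid[row][col] == 1:
--                 grid[row][col] = 0
--
--                 if not bfs():
--                     return True
--
--                 grid[row][col] = 1
--
--     return False
-- ===== SOURCE B (Python) =====
-- def isPossibleToCutPath(grid):
--     m, n = len(grid), len(grid[0])
--
--     def reach(g):
--         # DP sweep: dp[i][j] = start reached, or a 1-cell reachable from above/left.
--         dp = []
--         for i in range(m):
--             row = []
--             for j in range(n):
--                 ok = (i == 0 and j == 0) or (
--                     g[i][j] == 1 and ((i > 0 and dp[i - 1][j]) or (j > 0 and row[j - 1]))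
--                 )
--                 row.append(ok)
--             dp.append(row)
--         return bool(dp and dp[-1] and dp[-1][-1])
--
--     if reach(grid):
--         return True
--
--     for i in range(m):
--         for j in range(n):
--             if grid[i][j] == 1:
--                 cut = [r[:] for r in grid]
--                 cut[i][j] = 0
--                 if not reach(cut):
--                     return True
--     return False
-- ===== Notes on version B (the rewrite author's own statement) =====
-- stated objective: alternative
-- what changed: The inner connectivity test is replaced: A's queue/visited-set BFS becomes a dynamic-programming reachability sweep (dp[i][j] = cell is 1 and reachable from above or left, dp[0][0] seeded True); the outer flip loop is kept but works on a copy instead of mutating the grid in place.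
-- outside the precondition, e.g. on isPossibleToCutPath([[1, 0], [0]]): A returns True, B raises IndexError
import Mathlib
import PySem

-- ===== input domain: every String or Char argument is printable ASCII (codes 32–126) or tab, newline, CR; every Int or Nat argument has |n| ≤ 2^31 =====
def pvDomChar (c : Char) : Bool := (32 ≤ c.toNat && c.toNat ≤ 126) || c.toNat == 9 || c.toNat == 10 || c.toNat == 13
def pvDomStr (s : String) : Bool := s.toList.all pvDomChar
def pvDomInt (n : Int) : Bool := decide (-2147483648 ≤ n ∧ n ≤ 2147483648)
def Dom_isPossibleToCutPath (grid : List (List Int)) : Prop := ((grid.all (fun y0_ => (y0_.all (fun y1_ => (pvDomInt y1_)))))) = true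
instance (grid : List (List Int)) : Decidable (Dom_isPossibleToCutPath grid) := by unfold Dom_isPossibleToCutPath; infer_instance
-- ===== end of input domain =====

-- B replaces A's queue/visited BFS connectivity test by a DP reachability sweep (same outer
-- flip loop, on a copy instead of in-place); equivalence is about the RETURN value only:
-- Python A mutates `grid` in place (the cut cell stays 0 when the flip loop returns True), B does not.

-- ===== PORT A =====
-- grid[i][j]: only evaluated under guards 0 ≤ i < m, 0 ≤ j < n; exact under Pre_ (rows at least n long)
def pvCell (g : List (List Int)) (i j : Int) : Int := (g.getD i.toNat []).getD j.toNat 0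

-- termination weight of a queued cell (proof device only; 3^(distance-ish to the corner))
def pvStepW (m n : Int) (p : Int × Int) : Nat := 3 ^ ((m - p.1).toNat + (n - p.2).toNat)

lemma pv_two_pow_lt (e1 e2 E : Nat) (h1 : e1 + 1 = E) (h2 : e2 + 1 = E) :
    3 ^ e1 + 3 ^ e2 < 3 ^ E := by
  have he : e2 = e1 := by omega
  subst he; subst h1
  have hp : 0 < 3 ^ e2 := Nat.pow_pos (by norm_num)
  rw [pow_succ]; omega

lemma pv_one_pow_lt (e1 E : Nat) (h1 : e1 + 1 = E) : 3 ^ e1 < 3 ^ E := by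
  subst h1
  have hp : 0 < 3 ^ e1 := Nat.pow_pos (by norm_num)
  rw [pow_succ]; omega

-- the Python bfs() while-loop: FIFO queue, visited set, early return at the corner
def pvBfsLoop (g : List (List Int)) (m n : Int) (queue : List (Int × Int))
    (visited : PySem.Set (Int × Int)) : Bool :=
  match queue with
  | [] => false
  | (r, c) :: rest =>
    if r = m - 1 ∧ c = n - 1 then true
    else
      let visited' := PySem.Set.add visited (r, c)
      let q1 := if 0 ≤ r + 1 ∧ r + 1 < m ∧ 0 ≤ c ∧ c < n ∧ pvCell g (r + 1) c = 1 ∧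
                   PySem.Set.contains visited' (r + 1, c) = false
                then rest ++ [(r + 1, c)] else rest
      let q2 := if 0 ≤ r ∧ r < m ∧ 0 ≤ c + 1 ∧ c + 1 < n ∧ pvCell g r (c + 1) = 1 ∧
                   PySem.Set.contains visited' (r, c + 1) = false
                then q1 ++ [(r, c + 1)] else q1
      pvBfsLoop g m n q2 visited'
termination_by (queue.map (pvStepW m n)).sum
decreasing_by
  simp only [List.map_cons, List.sum_cons]
  split_ifs with hA hB hB <;>
    simp only [List.map_append, List.sum_append, List.map_cons, List.map_nil,
      List.sum_cons, List.sum_nil, pvStepW]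
  · obtain ⟨-, hrm, -, hcn, -, -⟩ := hA
    obtain ⟨-, hrm2, -, hcn2, -, -⟩ := hB
    have := pv_two_pow_lt ((m - (r + 1)).toNat + (n - c).toNat)
      ((m - r).toNat + (n - (c + 1)).toNat) ((m - r).toNat + (n - c).toNat)
      (by omega) (by omega)
    omega
  · obtain ⟨-, hrm, -, hcn, -, -⟩ := hA
    have := pv_one_pow_lt ((m - r).toNat + (n - (c + 1)).toNat)
      ((m - r).toNat + (n - c).toNat) (by omega)
    omega
  · obtain ⟨-, hrm2, -, hcn2, -, -⟩ := hB
    have := pv_one_pow_lt ((m - (r + 1)).toNat + (n - c).toNat)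
      ((m - r).toNat + (n - c).toNat) (by omega)
    omega
  · have : 0 < 3 ^ ((m - r).toNat + (n - c).toNat) := Nat.pow_pos (by norm_num)
    omega

def pvBfs (g : List (List Int)) (m n : Int) : Bool :=
  pvBfsLoop g m n [(0, 0)] PySem.Set.empty

-- grid[i][j] = 0 (A mutates then restores; as a value this is the one-cell-cut copy)
def pvCut (g : List (List Int)) (i j : Nat) : List (List Int) :=
  g.set i ((g.getD i []).set j 0)

-- the nested 'for row in range(m): for col in range(n):' index pairs, row-major
def pvCells (m n : Nat) : List (Nat × Nat) :=
  (List.range m).flatMap fun i => (List.range n).map fun j => (i, j)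

-- A's flip loop: zero the first 1-cell whose removal makes bfs fail
def pvTryA (g : List (List Int)) (m n : Int) : List (Nat × Nat) → Bool
  | [] => false
  | (i, j) :: rest =>
    if pvCell g i j = 1 then
      if pvBfs (pvCut g i j) m n = false then true else pvTryA g m n rest
    else pvTryA g m n rest

def isPossibleToCutPath (grid : List (List Int)) : Bool :=
  if pvBfs grid (grid.length : Int) (((grid.headD []).length : Nat) : Int) then true
  else pvTryA grid (grid.length : Int) (((grid.headD []).length : Nat) : Int)
        (pvCells grid.length (grid.headD []).length)

-- ===== PORT B =====
-- one DP row: row.append((i==0 and j==0) or (g[i][j]==1 and ((i>0 and dp[i-1][j]) or (j>0 and row[j-1]))))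
def pvDpRow (g : List (List Int)) (n : Nat) (i : Nat) (dp : List (List Bool)) : List Bool :=
  (List.range n).foldl
    (fun (row : List Bool) (j : Nat) =>
      row ++ [((i == 0 && j == 0) ||
        (pvCell g (i : Int) (j : Int) == 1 &&
          ((decide (0 < i) && ((dp.getD (i - 1) []).getD j false)) ||
           (decide (0 < j) && (row.getD (j - 1) false)))))])
    []

-- B's reach(): build the dp table, answer = bool(dp and dp[-1] and dp[-1][-1])
def pvReach (g : List (List Int)) (m n : Nat) : Bool :=
  let dp := (List.range m).foldl (fun dp i => dp ++ [pvDpRow g n i dp]) []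
  ((dp.getLast?.getD []).getLast?.getD false)

-- B's flip loop over a copied grid
def pvTryB (g : List (List Int)) (m n : Nat) : List (Nat × Nat) → Bool
  | [] => false
  | (i, j) :: rest =>
    if pvCell g (i : Int) (j : Int) = 1 then
      if pvReach (pvCut g i j) m n = false then true else pvTryB g m n rest
    else pvTryB g m n rest

def isPossibleToCutPath_alt (grid : List (List Int)) : Bool :=
  if pvReach grid grid.length (grid.headD []).length then true
  else pvTryB grid grid.length (grid.headD []).length
        (pvCells grid.length (grid.headD []).length)

-- ===== PRECONDITION & SPEC =====
-- Pre_ excludes the empty grid, on which Python A raises IndexError at len(grid[0]), and grids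
-- with a row shorter than the first row, on which A raises IndexError on some inputs and B raises on all.
def Pre_isPossibleToCutPath (grid : List (List Int)) : Prop :=
  grid ≠ [] ∧ ∀ r ∈ grid, (grid.headD []).length ≤ r.length
instance (grid : List (List Int)) : Decidable (Pre_isPossibleToCutPath grid) := by
  unfold Pre_isPossibleToCutPath; infer_instance

def pvWitness_isPossibleToCutPath : List (List Int) := [[1, 0], [0, 1]]

def Spec_isPossibleToCutPath (grid : List (List Int)) (out : Bool) : Prop := out = isPossibleToCutPath_alt grid
instance (grid : List (List Int)) (out : Bool) : Decidable (Spec_isPossibleToCutPath grid out) := by unfold Spec_isPossibleToCutPath; infer_instance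

-- ===== CLAIM (what is proved, stated in full; the proofs are below) =====
def Claim_equal_isPossibleToCutPath : Prop := ∀ (grid : List (List Int)), Dom_isPossibleToCutPath grid → Pre_isPossibleToCutPath grid → Spec_isPossibleToCutPath grid (isPossibleToCutPath grid)

-- ===== LEMMAS AND PROOFS =====

-- one admissible BFS move: down or right, in range, into a 1-cell
def pvStep (g : List (List Int)) (m n : Int) (p q : Int × Int) : Prop :=
  (q = (p.1 + 1, p.2) ∨ q = (p.1, p.2 + 1)) ∧
    0 ≤ q.1 ∧ q.1 < m ∧ 0 ≤ q.2 ∧ q.2 < n ∧ pvCell g q.1 q.2 = 1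

-- monotone down/right path; the start cell is free, every later cell is an in-range 1-cell
inductive pvPath (g : List (List Int)) (m n : Int) : Int × Int → Int × Int → Prop
  | refl (p) : pvPath g m n p p
  | cons {p q t} : pvStep g m n p q → pvPath g m n q t → pvPath g m n p t

lemma pvPath_snoc {g : List (List Int)} {m n : Int} {p q t : Int × Int}
    (h : pvPath g m n p q) (s : pvStep g m n q t) : pvPath g m n p t := by
  induction h with
  | refl p => exact .cons s (.refl t)
  | cons s' _ ih => exact .cons s' (ih s)

lemma pvPath_last {g : List (List Int)} {m n : Int} {p t : Int × Int}
    (h : pvPath g m n p t) : t = p ∨ ∃ q, pvPath g m n p q ∧ pvStep g m n q t := by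
  induction h with
  | refl p => exact .inl rfl
  | cons s _ ih =>
    rcases ih with rfl | ⟨q', hpath, hstep⟩
    · exact .inr ⟨_, .refl _, s⟩
    · exact .inr ⟨q', .cons s hpath, hstep⟩

lemma pvPath_bounds {g : List (List Int)} {m n : Int} {p t : Int × Int}
    (h : pvPath g m n p t) : t = p ∨ (0 ≤ t.1 ∧ t.1 < m ∧ 0 ≤ t.2 ∧ t.2 < n) := by
  rcases pvPath_last h with rfl | ⟨q, -, hs⟩
  · exact .inl rfl
  · exact .inr ⟨hs.2.1, hs.2.2.1, hs.2.2.2.1, hs.2.2.2.2.1⟩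

-- escape from the visited set: a visited cell with a path to the (unvisited) target
-- yields a queued cell with a path to the target, given the closure invariant
lemma pvEscape {g : List (List Int)} {m n : Int} {T : Int × Int} {q : List (Int × Int)}
    {v : PySem.Set (Int × Int)}
    (hT : PySem.Set.contains v T = false)
    (hcl : ∀ x, PySem.Set.contains v x = true → ∀ y, pvStep g m n x y →
      PySem.Set.contains v y = true ∨ y ∈ q) :
    ∀ y, pvPath g m n y T → PySem.Set.contains v y = true →
      ∃ p ∈ q, pvPath g m n p T := by
  intro y hp
  induction hp with
  | refl p =>
    intro hy
    have h2 : p ∈ v := by simpa using hy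
    have h3 : p ∉ v := by simpa using hT
    exact absurd h2 h3
  | cons s hrest ih =>
    intro hy
    rcases hcl _ hy _ s with h | h
    · exact ih hT h
    · exact ⟨_, h, hrest⟩


lemma pvPath_head {g : List (List Int)} {m n : Int} {p t : Int × Int}
    (h : pvPath g m n p t) : t = p ∨ ∃ y, pvStep g m n p y ∧ pvPath g m n y t := by
  cases h with
  | refl => exact .inl rfl
  | cons s hp => exact .inr ⟨_, s, hp⟩

lemma pvQ2_iff {g : List (List Int)} {m n r c : Int} {rest q2 : List (Int × Int)}
    {v' : PySem.Set (Int × Int)}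
    (hT' : PySem.Set.contains v' (m - 1, n - 1) = false)
    (hcl' : ∀ x, PySem.Set.contains v' x = true → ∀ y, pvStep g m n x y →
      PySem.Set.contains v' y = true ∨ y ∈ q2)
    (hrest : ∀ p ∈ rest, p ∈ q2)
    (hq2s : ∀ p ∈ q2, p ∈ rest ∨ pvStep g m n (r, c) p)
    (hadd : ∀ y, pvStep g m n (r, c) y → PySem.Set.contains v' y = true ∨ y ∈ q2)
    (hne : ¬(r = m - 1 ∧ c = n - 1)) :
    (∃ p ∈ q2, pvPath g m n p (m - 1, n - 1)) ↔
      ∃ p ∈ (r, c) :: rest, pvPath g m n p (m - 1, n - 1) := by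
  constructor
  · rintro ⟨p, hp, hpath⟩
    rcases hq2s p hp with h | h
    · exact ⟨p, List.mem_cons_of_mem _ h, hpath⟩
    · exact ⟨(r, c), List.mem_cons_self, .cons h hpath⟩
  · rintro ⟨p, hp, hpath⟩
    rcases List.mem_cons.mp hp with rfl | h
    · rcases pvPath_head hpath with heq | ⟨y, hs, hpt⟩
      · injection heq with h1 h2
        exact absurd ⟨h1.symm, h2.symm⟩ hne
      · rcases hadd y hs with hvy | hq
        · exact pvEscape hT' hcl' y hpt hvy
        · exact ⟨y, hq, hpt⟩
    · exact ⟨p, hrest p h, hpath⟩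

lemma pvBfsLoop_iff (g : List (List Int)) (m n : Int) :
    ∀ (q : List (Int × Int)) (v : PySem.Set (Int × Int)),
      PySem.Set.contains v (m - 1, n - 1) = false →
      (∀ x, PySem.Set.contains v x = true → ∀ y, pvStep g m n x y →
        PySem.Set.contains v y = true ∨ y ∈ q) →
      (pvBfsLoop g m n q v = true ↔ ∃ p ∈ q, pvPath g m n p (m - 1, n - 1)) := by
  intro q v
  induction q, v using pvBfsLoop.induct g m n with
  | case1 v => intro _ _; rw [pvBfsLoop]; simp
  | case2 v r c rest htgt =>
    intro _ _
    rw [pvBfsLoop]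
    simp only [htgt.1, htgt.2, and_self, if_true]
    constructor
    · intro _
      exact ⟨(m - 1, n - 1), List.mem_cons_self, .refl _⟩
    · intro _; trivial
  | case3 v r c rest hne visited' q1 q2 ih =>
    intro hT hcl
    have hv' : visited' = PySem.Set.add v (r, c) := rfl
    have hq1 : q1 = if 0 ≤ r + 1 ∧ r + 1 < m ∧ 0 ≤ c ∧ c < n ∧ pvCell g (r + 1) c = 1 ∧
        PySem.Set.contains visited' (r + 1, c) = false then rest ++ [(r + 1, c)] else rest := rfl
    have hq2 : q2 = if 0 ≤ r ∧ r < m ∧ 0 ≤ c + 1 ∧ c + 1 < n ∧ pvCell g r (c + 1) = 1 ∧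
        PySem.Set.contains visited' (r, c + 1) = false then q1 ++ [(r, c + 1)] else q1 := rfl
    have hcont' : ∀ y : Int × Int, PySem.Set.contains visited' y = true ↔
        (PySem.Set.contains v y = true ∨ y = (r, c)) := by
      intro y
      rw [hv']
      simp [PySem.Set.mem_add]
    have hrest : ∀ p ∈ rest, p ∈ q2 := by
      intro p hp
      rw [hq2, hq1]
      split_ifs <;> (try simp only [List.mem_append, List.mem_singleton]) <;> tauto
    have hq2s : ∀ p ∈ q2, p ∈ rest ∨ pvStep g m n (r, c) p := by
      intro p hp
      rw [hq2, hq1] at hp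
      split_ifs at hp with h1 h2 h2 <;> (try simp only [List.mem_append, List.mem_singleton] at hp)
      · rcases hp with (hp | rfl) | rfl
        · exact .inl hp
        · exact .inr ⟨.inl rfl, h2.1, h2.2.1, h2.2.2.1, h2.2.2.2.1, h2.2.2.2.2.1⟩
        · exact .inr ⟨.inr rfl, h1.1, h1.2.1, h1.2.2.1, h1.2.2.2.1, h1.2.2.2.2.1⟩
      · rcases hp with hp | rfl
        · exact .inl hp
        · exact .inr ⟨.inr rfl, h1.1, h1.2.1, h1.2.2.1, h1.2.2.2.1, h1.2.2.2.2.1⟩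
      · rcases hp with hp | rfl
        · exact .inl hp
        · exact .inr ⟨.inl rfl, h2.1, h2.2.1, h2.2.2.1, h2.2.2.2.1, h2.2.2.2.2.1⟩
      · exact .inl hp
    have hadd : ∀ y, pvStep g m n (r, c) y →
        PySem.Set.contains visited' y = true ∨ y ∈ q2 := by
      intro y hs
      by_cases hvy : PySem.Set.contains visited' y = true
      · exact .inl hvy
      · right
        have hvy' : PySem.Set.contains visited' y = false := by
          simpa using hvy
        obtain ⟨hshape, hb1, hb2, hb3, hb4, hc1⟩ := hs
        rcases hshape with h | h <;> subst h
        · have hGD : 0 ≤ r + 1 ∧ r + 1 < m ∧ 0 ≤ c ∧ c < n ∧ pvCell g (r + 1) c = 1 ∧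
              PySem.Set.contains visited' (r + 1, c) = false :=
            ⟨hb1, hb2, hb3, hb4, hc1, hvy'⟩
          rw [hq2, hq1, if_pos hGD]
          split_ifs <;> simp
        · have hGR : 0 ≤ r ∧ r < m ∧ 0 ≤ c + 1 ∧ c + 1 < n ∧ pvCell g r (c + 1) = 1 ∧
              PySem.Set.contains visited' (r, c + 1) = false :=
            ⟨hb1, hb2, hb3, hb4, hc1, hvy'⟩
          rw [hq2, if_pos hGR]
          simp
    have hT' : PySem.Set.contains visited' (m - 1, n - 1) = false := by
      rw [Bool.eq_false_iff]
      intro hx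
      rcases (hcont' _).mp hx with h | h
      · rw [h] at hT; cases hT
      · injection h with h1 h2
        exact hne ⟨h1.symm, h2.symm⟩
    have hcl' : ∀ x, PySem.Set.contains visited' x = true → ∀ y, pvStep g m n x y →
        PySem.Set.contains visited' y = true ∨ y ∈ q2 := by
      intro x hx y hs
      rcases (hcont' x).mp hx with hxv | rfl
      · rcases hcl x hxv y hs with h | h
        · exact .inl ((hcont' y).mpr (.inl h))
        · rcases List.mem_cons.mp h with rfl | h2
          · exact .inl ((hcont' _).mpr (.inr rfl))
          · exact .inr (hrest _ h2)
      · exact hadd y hs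
    have hunfold : pvBfsLoop g m n ((r, c) :: rest) v = pvBfsLoop g m n q2 visited' := by
      conv_lhs => rw [pvBfsLoop]
      simp only [if_neg hne]
      rfl
    rw [hunfold, ih hT' hcl']
    exact pvQ2_iff hT' hcl' hrest hq2s hadd hne

lemma pvBfs_iff (g : List (List Int)) (m n : Int) :
    pvBfs g m n = true ↔ pvPath g m n (0, 0) (m - 1, n - 1) := by
  have hcl : ∀ x, PySem.Set.contains (PySem.Set.empty : PySem.Set (Int × Int)) x = true →
      ∀ y, pvStep g m n x y →
        PySem.Set.contains (PySem.Set.empty : PySem.Set (Int × Int)) y = true ∨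
          y ∈ ([(0, 0)] : List (Int × Int)) := by
    intro x hx
    simp [PySem.Set.empty, PySem.Set.contains] at hx
  have h := pvBfsLoop_iff g m n [(0, 0)] PySem.Set.empty rfl hcl
  rw [pvBfs, h]
  simp


-- prefix of the DP table after the first k outer iterations
def pvDpTab (g : List (List Int)) (n : Nat) (k : Nat) : List (List Bool) :=
  (List.range k).foldl (fun dp i => dp ++ [pvDpRow g n i dp]) []

lemma pvDpTab_succ (g : List (List Int)) (n k : Nat) :
    pvDpTab g n (k + 1) = pvDpTab g n k ++ [pvDpRow g n k (pvDpTab g n k)] := by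
  unfold pvDpTab
  rw [List.range_succ, List.foldl_append]
  rfl

-- prefix of one DP row after the first k inner iterations
def pvRowPre (g : List (List Int)) (i : Nat) (dp : List (List Bool)) (k : Nat) : List Bool :=
  (List.range k).foldl
    (fun (row : List Bool) (j : Nat) =>
      row ++ [((i == 0 && j == 0) ||
        (pvCell g (i : Int) (j : Int) == 1 &&
          ((decide (0 < i) && ((dp.getD (i - 1) []).getD j false)) ||
           (decide (0 < j) && (row.getD (j - 1) false)))))])
    []

lemma pvDpRow_eq (g : List (List Int)) (n i : Nat) (dp : List (List Bool)) :
    pvDpRow g n i dp = pvRowPre g i dp n := rfl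

lemma pvRowPre_succ (g : List (List Int)) (i : Nat) (dp : List (List Bool)) (k : Nat) :
    pvRowPre g i dp (k + 1) = pvRowPre g i dp k ++
      [((i == 0 && k == 0) ||
        (pvCell g (i : Int) (k : Int) == 1 &&
          ((decide (0 < i) && ((dp.getD (i - 1) []).getD k false)) ||
           (decide (0 < k) && ((pvRowPre g i dp k).getD (k - 1) false)))))] := by
  unfold pvRowPre
  rw [List.range_succ, List.foldl_append]
  rfl

lemma pvPath_rec (g : List (List Int)) (m n : Int) (i j : Int)
    (hi0 : 0 ≤ i) (him : i < m) (hj0 : 0 ≤ j) (hjn : j < n) :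
    pvPath g m n (0, 0) (i, j) ↔
      ((i = 0 ∧ j = 0) ∨
        (pvCell g i j = 1 ∧ ((0 < i ∧ pvPath g m n (0, 0) (i - 1, j)) ∨
          (0 < j ∧ pvPath g m n (0, 0) (i, j - 1))))) := by
  constructor
  · intro h
    rcases pvPath_last h with heq | ⟨q, hq, hs⟩
    · rw [Prod.mk.injEq] at heq
      exact .inl ⟨heq.1, heq.2⟩
    · right
      obtain ⟨hshape, hb1, hb2, hb3, hb4, hcell⟩ := hs
      refine ⟨hcell, ?_⟩
      have hqb := pvPath_bounds hq
      obtain ⟨qa, qb⟩ := q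
      have hq0 : 0 ≤ qa ∧ 0 ≤ qb := by
        rcases hqb with heq2 | hb
        · rw [Prod.mk.injEq] at heq2; constructor <;> omega
        · exact ⟨hb.1, hb.2.2.1⟩
      rcases hshape with hsh | hsh <;> rw [Prod.mk.injEq] at hsh
      · left
        refine ⟨by omega, ?_⟩
        have he : ((i - 1, j) : Int × Int) = (qa, qb) := by
          rw [Prod.mk.injEq]; constructor <;> omega
        rw [he]; exact hq
      · right
        refine ⟨by omega, ?_⟩
        have he : ((i, j - 1) : Int × Int) = (qa, qb) := by
          rw [Prod.mk.injEq]; constructor <;> omega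
        rw [he]; exact hq
  · rintro (⟨rfl, rfl⟩ | ⟨hcell, ⟨hipos, hp⟩ | ⟨hjpos, hp⟩⟩)
    · exact .refl _
    · exact pvPath_snoc hp ⟨.inl (by show (i, j) = (i - 1 + 1, j); rw [sub_add_cancel]),
        hi0, him, hj0, hjn, hcell⟩
    · exact pvPath_snoc hp ⟨.inr (by show (i, j) = (i, j - 1 + 1); rw [sub_add_cancel]),
        hi0, him, hj0, hjn, hcell⟩

lemma pvRowPre_spec (g : List (List Int)) (m n i : Nat) (him : i < m)
    (dp : List (List Bool))
    (hprev : 0 < i → ∀ j, j < n →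
      (((dp.getD (i - 1) []).getD j false = true) ↔
        pvPath g (m : Int) (n : Int) (0, 0) ((i : Int) - 1, (j : Int)))) :
    ∀ k, k ≤ n → (pvRowPre g i dp k).length = k ∧
      ∀ j, j < k → ((pvRowPre g i dp k).getD j false = true ↔
        pvPath g (m : Int) (n : Int) (0, 0) ((i : Int), (j : Int))) := by
  intro k
  induction k with
  | zero => intro _; exact ⟨rfl, by omega⟩
  | succ k ihk =>
    intro hk
    obtain ⟨hlen, hent⟩ := ihk (by omega)
    rw [pvRowPre_succ]
    constructor
    · simp [hlen]
    · intro j hj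
      by_cases hjk : j < k
      · rw [List.getD_append _ _ _ _ (by omega)]
        exact hent j hjk
      · have hjeq : j = k := by omega
        subst hjeq
        rw [List.getD_append_right _ _ _ _ (by omega), hlen, Nat.sub_self]
        have hkn : j < n := by omega
        have hgetd : ∀ b : Bool, ([b].getD 0 false) = b := by intro b; rfl
        rw [hgetd]
        rw [pvPath_rec g (m : Int) (n : Int) (i : Int) (j : Int)
          (by positivity) (by exact_mod_cast him) (by positivity) (by exact_mod_cast hkn)]
        simp only [Bool.or_eq_true, Bool.and_eq_true, beq_iff_eq, decide_eq_true_eq]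
        constructor
        · rintro (⟨h1, h2⟩ | ⟨hc, ⟨hi, hdp⟩ | ⟨hk0, hrow⟩⟩)
          · exact .inl ⟨by exact_mod_cast h1, by exact_mod_cast h2⟩
          · exact .inr ⟨hc, .inl ⟨by exact_mod_cast hi, (hprev hi j hkn).mp hdp⟩⟩
          · refine .inr ⟨hc, .inr ⟨by exact_mod_cast hk0, ?_⟩⟩
            have h3 := (hent (j - 1) (by omega)).mp hrow
            have hc2 : ((j - 1 : Nat) : Int) = (j : Int) - 1 := by omega
            rwa [hc2] at h3
        · rintro (⟨h1, h2⟩ | ⟨hc, ⟨hi, hdp⟩ | ⟨hk0, hrow⟩⟩)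
          · exact .inl ⟨by exact_mod_cast h1, by exact_mod_cast h2⟩
          · have hi' : 0 < i := by exact_mod_cast hi
            exact .inr ⟨hc, .inl ⟨hi', (hprev hi' j hkn).mpr hdp⟩⟩
          · have hk0' : 0 < j := by exact_mod_cast hk0
            refine .inr ⟨hc, .inr ⟨hk0', ?_⟩⟩
            refine (hent (j - 1) (by omega)).mpr ?_
            have hc2 : ((j - 1 : Nat) : Int) = (j : Int) - 1 := by omega
            rwa [hc2]

lemma pvDpTab_spec (g : List (List Int)) (m n : Nat) :
    ∀ k, k ≤ m → (pvDpTab g n k).length = k ∧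
      (∀ i, i < k → ((pvDpTab g n k).getD i []).length = n) ∧
      (∀ i j, i < k → j < n → (((pvDpTab g n k).getD i []).getD j false = true ↔
        pvPath g (m : Int) (n : Int) (0, 0) ((i : Int), (j : Int)))) := by
  intro k
  induction k with
  | zero => intro _; exact ⟨rfl, by omega, by omega⟩
  | succ k ihk =>
    intro hk
    obtain ⟨hlen, hrowlen, hent⟩ := ihk (by omega)
    have hprev : 0 < k → ∀ j, j < n →
        ((((pvDpTab g n k).getD (k - 1) []).getD j false = true) ↔
          pvPath g (m : Int) (n : Int) (0, 0) ((k : Int) - 1, (j : Int))) := by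
      intro hkpos j hj
      have h := hent (k - 1) j (by omega) hj
      have hc2 : ((k - 1 : Nat) : Int) = (k : Int) - 1 := by omega
      rwa [hc2] at h
    obtain ⟨hrl, hre⟩ := pvRowPre_spec g m n k (by omega) (pvDpTab g n k) hprev n le_rfl
    rw [pvDpTab_succ]
    refine ⟨by simp [hlen], ?_, ?_⟩
    · intro i hi
      by_cases hik : i < k
      · rw [List.getD_append _ _ _ _ (by omega)]
        exact hrowlen i hik
      · have : i = k := by omega
        subst this
        rw [List.getD_append_right _ _ _ _ (by omega), hlen, Nat.sub_self]
        rw [show ([pvDpRow g n i (pvDpTab g n i)].getD 0 [] : List Bool) =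
          pvDpRow g n i (pvDpTab g n i) from rfl]
        rw [pvDpRow_eq]
        exact hrl
    · intro i j hi hj
      by_cases hik : i < k
      · rw [List.getD_append _ _ _ _ (by omega)]
        exact hent i j hik hj
      · have : i = k := by omega
        subst this
        rw [List.getD_append_right _ _ _ _ (by omega), hlen, Nat.sub_self]
        rw [show ([pvDpRow g n i (pvDpTab g n i)].getD 0 [] : List Bool) =
          pvDpRow g n i (pvDpTab g n i) from rfl]
        rw [pvDpRow_eq]
        exact hre j hj



lemma pvGetLast?_eq_getD {α : Type} (l : List α) (d : α) (h : 0 < l.length) :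
    l.getLast? = some (l.getD (l.length - 1) d) := by
  rw [List.getLast?_eq_getElem?]
  rw [List.getElem?_eq_getElem (show l.length - 1 < l.length by omega)]
  rw [List.getD_eq_getElem?_getD, List.getElem?_eq_getElem (by omega)]
  rfl

lemma pvReach_iff (g : List (List Int)) (m n : Nat) :
    pvReach g m n = true ↔ pvPath g (m : Int) (n : Int) (0, 0) ((m : Int) - 1, (n : Int) - 1) := by
  obtain ⟨hlen, hrowlen, hent⟩ := pvDpTab_spec g m n m le_rfl
  have hre : pvReach g m n =
      (((pvDpTab g n m).getLast?.getD []).getLast?.getD false) := rfl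
  rcases Nat.eq_zero_or_pos m with rfl | hm
  · have h0 : pvDpTab g n 0 = [] := rfl
    rw [hre, h0]
    refine iff_of_false (by simp) ?_
    intro h
    rcases pvPath_bounds h with heq | hb
    · rw [Prod.mk.injEq] at heq; omega
    · have := hb.1; omega
  · have hml : 0 < (pvDpTab g n m).length := by omega
    rw [hre, pvGetLast?_eq_getD _ [] hml]
    simp only [Option.getD_some]
    rw [hlen]
    have hrl : ((pvDpTab g n m).getD (m - 1) []).length = n := hrowlen (m - 1) (by omega)
    rcases Nat.eq_zero_or_pos n with rfl | hn
    · rw [List.eq_nil_of_length_eq_zero hrl]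
      refine iff_of_false (by simp) ?_
      intro h
      rcases pvPath_bounds h with heq | hb
      · rw [Prod.mk.injEq] at heq; omega
      · have := hb.2.2.1; omega
    · rw [pvGetLast?_eq_getD _ false (by omega)]
      simp only [Option.getD_some]
      rw [hrl]
      have h := hent (m - 1) (n - 1) (by omega) (by omega)
      have hc1 : ((m - 1 : Nat) : Int) = (m : Int) - 1 := by omega
      have hc2 : ((n - 1 : Nat) : Int) = (n : Int) - 1 := by omega
      rwa [hc1, hc2] at h

lemma pvBfs_eq_pvReach (g : List (List Int)) (m n : Nat) :
    pvBfs g (m : Int) (n : Int) = pvReach g m n := by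
  rw [Bool.eq_iff_iff, pvBfs_iff, pvReach_iff]

lemma pvTry_eq (g : List (List Int)) (m n : Nat) :
    ∀ cs, pvTryA g (m : Int) (n : Int) cs = pvTryB g m n cs := by
  intro cs
  induction cs with
  | nil => rfl
  | cons c rest ih =>
    obtain ⟨i, j⟩ := c
    simp only [pvTryA, pvTryB, pvBfs_eq_pvReach, ih]

-- ===== VERDICT (by name: the statement is the Claim_ definition above) =====
theorem isPossibleToCutPath_spec : Claim_equal_isPossibleToCutPath := by
  intro grid _ _
  unfold Spec_isPossibleToCutPath isPossibleToCutPath isPossibleToCutPath_alt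
  rw [pvBfs_eq_pvReach, pvTry_eq]
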